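-- pv_equiv track=rewrite | github.com/FlynnOConnell/neuroexplore | helpers/funcs.py | interval
-- ===== SOURCE A (Python) =====
-- from typing import Iterable, Optional, Any, Tuple
--
-- def interval(
--         lst: Iterable[any], gap: Optional[int] = 1, outer: bool = False
-- ) -> list[tuple[Any, Any]]:
--     """
--     Create intervals where there elements are separated by either:
--         -less than gap.
--         -more than gap.
--     Args:
--         lst (Iterable): Iterable to search.
--         gap (int | float): length of interval.
--         outer (bool): Makes larger than (gap) intervals.
--     Returns:
--          interv (list): New list with created interval.
--     """
--     interv, tmp = [], []
--
--     for v in lst: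
--         if not tmp:
--             tmp.append(v)
--         elif abs(tmp[-1] - v) < gap:
--             tmp.append(v)
--         elif outer:
--             interv.append(tuple((tmp[-1], v)))
--             tmp = [v]
--         else:
--             interv.append(tuple((tmp[0], tmp[-1])))
--             tmp = [v]
--     return interv
-- ===== SOURCE B (Python) =====
-- def interval(lst, gap=1, outer=False):
--     # group-first: split lst into runs, then map runs to pairs
--     runs, cur = [], []
--     for v in lst:
--         if cur and not (abs(cur[-1] - v) < gap):
--             runs.append(cur)
--             cur = [v]
--         else:
--             cur.append(v)
--     runs.append(cur)
--     if outer: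
--         return [(a[-1], b[0]) for a, b in zip(runs, runs[1:])]
--     return [(r[0], r[-1]) for r in runs[:-1]]
-- ===== Notes on version B (the rewrite author's own statement) =====
-- stated objective: alternative
-- what changed: Replaced A's single stateful pass that emits pairs at each break with a group-first decomposition: one pass splits the list into runs, then the result is mapped from the runs (run endpoints for inner mode, adjacent-run boundaries zipped for outer mode).
import Mathlib
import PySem

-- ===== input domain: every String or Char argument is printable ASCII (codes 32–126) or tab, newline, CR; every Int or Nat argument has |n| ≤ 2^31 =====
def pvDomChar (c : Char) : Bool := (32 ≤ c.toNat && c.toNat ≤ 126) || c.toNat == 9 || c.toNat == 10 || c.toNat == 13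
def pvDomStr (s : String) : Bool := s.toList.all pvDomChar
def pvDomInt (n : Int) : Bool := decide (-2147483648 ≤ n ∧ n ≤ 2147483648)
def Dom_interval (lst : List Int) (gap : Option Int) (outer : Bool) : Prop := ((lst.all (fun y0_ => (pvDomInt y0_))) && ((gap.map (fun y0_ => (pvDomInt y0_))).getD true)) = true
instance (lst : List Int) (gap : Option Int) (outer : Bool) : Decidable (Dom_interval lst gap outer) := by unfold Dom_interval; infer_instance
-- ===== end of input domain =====

-- B changes the decomposition (group into runs first, then map to pairs); same O(n) cost.

-- ===== PORT A =====
-- A's loop: state (interv, tmp); tmp[-1] = getLastD 0, tmp[0] = headD 0 (tmp nonempty where read).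
def intervalStepA (g : Int) (outer : Bool) (st : List (Int × Int) × List Int) (v : Int) :
    List (Int × Int) × List Int :=
  if st.2 = [] then (st.1, st.2 ++ [v])
  else if |st.2.getLastD 0 - v| < g then (st.1, st.2 ++ [v])
  else if outer then (st.1 ++ [(st.2.getLastD 0, v)], [v])
  else (st.1 ++ [(st.2.headD 0, st.2.getLastD 0)], [v])

def interval (lst : List Int) (gap : Option Int) (outer : Bool) : List (Int × Int) :=
  (lst.foldl (intervalStepA (gap.getD 0) outer) ([], [])).1

-- ===== PORT B =====
-- one pass collecting runs
def intervalRunsStep (g : Int) (st : List (List Int) × List Int) (v : Int) :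
    List (List Int) × List Int :=
  if st.2 ≠ [] ∧ ¬ (|st.2.getLastD 0 - v| < g) then (st.1 ++ [st.2], [v])
  else (st.1, st.2 ++ [v])

def intervalRuns (g : Int) (lst : List Int) : List (List Int) :=
  let st := lst.foldl (intervalRunsStep g) ([], [])
  st.1 ++ [st.2]

def interval_alt (lst : List Int) (gap : Option Int) (outer : Bool) : List (Int × Int) :=
  let runs := intervalRuns (gap.getD 0) lst
  if outer then (runs.zip runs.tail).map (fun p => (p.1.getLastD 0, p.2.headD 0))
  else runs.dropLast.map (fun r => (r.headD 0, r.getLastD 0))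

-- ===== PRECONDITION & SPEC =====
-- With gap = None and at least two elements Python A raises TypeError (int < None); excluded.
def Pre_interval (lst : List Int) (gap : Option Int) (outer : Bool) : Prop :=
  gap = none → lst.length ≤ 1
instance (lst : List Int) (gap : Option Int) (outer : Bool) : Decidable (Pre_interval lst gap outer) := by unfold Pre_interval; infer_instance

def pvWitness_interval : List Int × Option Int × Bool := ([1, 2, 5, 6, 10], some 2, false)

def Spec_interval (lst : List Int) (gap : Option Int) (outer : Bool) (out : List (Int × Int)) : Prop := out = interval_alt lst gap outer
instance (lst : List Int) (gap : Option Int) (outer : Bool) (out : List (Int × Int)) : Decidable (Spec_interval lst gap outer out) := by unfold Spec_interval; infer_instance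

-- ===== CLAIM (what is proved, stated in full; the proofs are below) =====
def Claim_equal_interval : Prop := ∀ (lst : List Int) (gap : Option Int) (outer : Bool), Dom_interval lst gap outer → Pre_interval lst gap outer → Spec_interval lst gap outer (interval lst gap outer)

-- ===== LEMMAS AND PROOFS =====

-- render of the runs accumulated so far, inner mode
def rendInner (rs : List (List Int)) : List (Int × Int) :=
  rs.map (fun r => (r.headD 0, r.getLastD 0))

-- adjacent-pair rendering for outer mode
def pairsOuter (rs : List (List Int)) : List (Int × Int) :=
  (rs.zip rs.tail).map (fun p => (p.1.getLastD 0, p.2.headD 0))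

theorem pairsOuter_snoc (rs : List (List Int)) (c y : List Int) :
    pairsOuter ((rs ++ [c]) ++ [y]) = pairsOuter (rs ++ [c]) ++ [(c.getLastD 0, y.headD 0)] := by
  induction rs with
  | nil => simp [pairsOuter]
  | cons a t ih =>
    cases t with
    | nil => simp [pairsOuter]
    | cons b t' =>
      have h := ih
      simp only [List.cons_append, pairsOuter, List.tail_cons, List.zip_cons_cons,
        List.map_cons] at h ⊢
      rw [List.cons.injEq]
      exact ⟨rfl, h⟩

theorem inner_invariant (g : Int) (lst : List Int) (rs : List (List Int)) (cur : List Int) :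
    lst.foldl (intervalStepA g false) (rendInner rs, cur)
      = (rendInner (lst.foldl (intervalRunsStep g) (rs, cur)).1,
         (lst.foldl (intervalRunsStep g) (rs, cur)).2) := by
  induction lst generalizing rs cur with
  | nil => rfl
  | cons v t ih =>
    simp only [List.foldl_cons]
    by_cases hc : cur = []
    · subst hc
      have eA : intervalStepA g false (rendInner rs, []) v = (rendInner rs, [v]) := by
        simp [intervalStepA]
      have eB : intervalRunsStep g (rs, []) v = (rs, [v]) := by
        simp [intervalRunsStep]
      rw [eA, eB]; exact ih rs [v]
    · by_cases hg : |cur.getLast?.getD 0 - v| < g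
      · have eA : intervalStepA g false (rendInner rs, cur) v = (rendInner rs, cur ++ [v]) := by
          simp [intervalStepA, hc, hg]
        have eB : intervalRunsStep g (rs, cur) v = (rs, cur ++ [v]) := by
          simp [intervalRunsStep, hc, hg]
        rw [eA, eB]; exact ih rs (cur ++ [v])
      · have eA : intervalStepA g false (rendInner rs, cur) v
            = (rendInner (rs ++ [cur]), [v]) := by
          simp [intervalStepA, hc, hg, rendInner]
        have eB : intervalRunsStep g (rs, cur) v = (rs ++ [cur], [v]) := by
          simp [intervalRunsStep, hc, hg]
        rw [eA, eB]; exact ih (rs ++ [cur]) [v]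

theorem pairsOuter_congr_last (rs : List (List Int)) (c c' : List Int)
    (h : c.headD 0 = c'.headD 0) :
    pairsOuter (rs ++ [c]) = pairsOuter (rs ++ [c']) := by
  induction rs with
  | nil => simp [pairsOuter]
  | cons a t ih =>
    cases t with
    | nil =>
      simp only [List.nil_append, List.cons_append, pairsOuter, List.tail_cons,
        List.zip_cons_cons, List.map_cons]
      rw [List.cons.injEq]
      refine ⟨?_, rfl⟩
      have h' : c.headD 0 = c'.headD 0 := by
        simpa [List.headD_eq_head?_getD] using h
      rw [h']
    | cons b t' =>
      simp only [List.cons_append, pairsOuter, List.tail_cons, List.zip_cons_cons,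
        List.map_cons] at ih ⊢
      rw [List.cons.injEq]
      exact ⟨rfl, ih⟩

theorem outer_invariant (g : Int) (lst : List Int) (rs : List (List Int)) (cur : List Int)
    (hrc : cur = [] → rs = []) :
    lst.foldl (intervalStepA g true) (pairsOuter (rs ++ [cur]), cur)
      = (pairsOuter ((lst.foldl (intervalRunsStep g) (rs, cur)).1
            ++ [(lst.foldl (intervalRunsStep g) (rs, cur)).2]),
         (lst.foldl (intervalRunsStep g) (rs, cur)).2) := by
  induction lst generalizing rs cur with
  | nil => rfl
  | cons v t ih =>
    simp only [List.foldl_cons]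
    by_cases hc : cur = []
    · subst hc
      rw [hrc rfl]
      have eA : intervalStepA g true (pairsOuter ([] ++ [([] : List Int)]), []) v
          = (pairsOuter ([] ++ [[v]]), [v]) := by
        simp [intervalStepA, pairsOuter]
      have eB : intervalRunsStep g ([], []) v = ([], [v]) := by
        simp [intervalRunsStep]
      rw [eA, eB]; exact ih [] [v] (by simp)
    · by_cases hg : |cur.getLast?.getD 0 - v| < g
      · have hhd : cur.headD 0 = (cur ++ [v]).headD 0 := by
          cases cur with
          | nil => exact absurd rfl hc
          | cons a t' => rfl
        have eA : intervalStepA g true (pairsOuter (rs ++ [cur]), cur) v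
            = (pairsOuter (rs ++ [cur ++ [v]]), cur ++ [v]) := by
          simp only [intervalStepA, List.getLastD_eq_getLast?]
          rw [if_neg hc, if_pos hg, pairsOuter_congr_last rs cur (cur ++ [v]) hhd]
        have eB : intervalRunsStep g (rs, cur) v = (rs, cur ++ [v]) := by
          simp [intervalRunsStep, hc, hg]
        rw [eA, eB]; exact ih rs (cur ++ [v]) (by simp)
      · have eA : intervalStepA g true (pairsOuter (rs ++ [cur]), cur) v
            = (pairsOuter ((rs ++ [cur]) ++ [[v]]), [v]) := by
          simp only [intervalStepA]
          rw [if_neg hc, if_neg (by rw [List.getLastD_eq_getLast?]; exact hg),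
            pairsOuter_snoc]
          rfl
        have eB : intervalRunsStep g (rs, cur) v = (rs ++ [cur], [v]) := by
          simp [intervalRunsStep, hc, hg]
        rw [eA, eB]
        have h3 := ih (rs ++ [cur]) [v] (by simp)
        rw [List.append_assoc] at h3
        simpa using h3

-- ===== VERDICT (by name: the statement is the Claim_ definition above) =====
theorem interval_spec : Claim_equal_interval := by
  intro lst gap outer _ _
  unfold Spec_interval interval interval_alt intervalRuns
  cases outer with
  | false =>
    have h := inner_invariant (gap.getD 0) lst [] []
    simp only [rendInner, List.map_nil] at h
    simp [h]
  | true =>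
    have h := outer_invariant (gap.getD 0) lst [] [] (fun _ => rfl)
    have h0 : pairsOuter ([] ++ [([] : List Int)]) = [] := by simp [pairsOuter]
    rw [h0] at h
    rw [h]
    rfl
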